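-- pv_equiv track=rewrite | github.com/hshziwo/Python-Team-Notes | heap/디스크컨트롤러 오답.py | solution
-- ===== SOURCE A (Python) =====
-- import heapq
-- import heapq
--
-- def solution(jobs):
--     tmp_heap = []
--     for i in jobs :
--         heapq.heappush(tmp_heap, (i[1], i))
--
--     answer = 0
--     second = 0
--     disk = []
--     while tmp_heap :
--         if len(disk) == 0 :
--             value = heapq.heappop(tmp_heap)
--             disk.append(value[1])
--             wait_value = second - value[1][0]
--             work_value = value[1][1]
--             second += work_value
--             answer += wait_value + work_value
--             disk.pop(0)
--         else :
--             second += 1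
--
--     answer = answer // len(jobs)
--     return answer
-- ===== SOURCE B (Python) =====
-- def solution(jobs):
--     n = len(jobs)
--     # closed form: total turnaround = sum over sorted durations of d * (jobs remaining
--     # when d starts) minus the sum of all start times; no clock simulation needed.
--     total = -sum(j[0] for j in jobs)
--     rem = n
--     for d in sorted(j[1] for j in jobs):
--         total += d * rem
--         rem -= 1
--     return total // n
-- ===== Notes on version B (the rewrite author's own statement) =====
-- stated objective: alternative
-- what changed: Replaces A's heap-pop simulation of a running clock (while/heappop, second accumulator, dead 'disk' list and else branch) by a closed-form computation: sort the durations alone and add each duration times the number of jobs still remaining, minus the sum of all start times; no clock state and no per-job tuple comparison.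
import Mathlib
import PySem

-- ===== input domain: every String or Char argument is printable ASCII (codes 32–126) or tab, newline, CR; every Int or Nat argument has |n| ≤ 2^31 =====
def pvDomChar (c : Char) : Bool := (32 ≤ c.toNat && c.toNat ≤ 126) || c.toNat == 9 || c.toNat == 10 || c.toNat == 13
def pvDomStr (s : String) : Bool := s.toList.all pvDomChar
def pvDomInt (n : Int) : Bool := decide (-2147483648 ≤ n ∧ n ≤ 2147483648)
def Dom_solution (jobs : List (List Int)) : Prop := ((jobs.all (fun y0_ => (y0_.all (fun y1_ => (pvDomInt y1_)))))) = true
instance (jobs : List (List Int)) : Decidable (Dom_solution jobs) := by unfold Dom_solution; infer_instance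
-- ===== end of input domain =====

-- B replaces A's heap simulation of the clock by a closed form: total turnaround =
-- sum of d*(remaining jobs) over sorted durations minus the sum of all start times;
-- same value on every non-empty jobs list whose jobs have at least two entries
-- (elsewhere the Python raises).


-- ===== PORT A =====
-- Python's tuple comparison (duration, job) with lexicographic list comparison is exactly the
-- lexicographic order on Int × List Int (Lean's `Lex` of the product, lists compared lexically).
def pyLex (p : Int × List Int) : Lex (Int × List Int) := toLex p

-- heapq contract: heappop returns the minimum element under Python's comparison; the heap's
-- internal array layout is unobservable, so the heap is modelled as the list of its elements
-- and heappop as "first minimal element, removed".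
def popLoop (heap : List (Int × List Int)) (answer second : Int) : Int :=
  match hm : PySem.List.min? heap pyLex with
  | none => answer                                   -- while tmp_heap: loop ends
  | some value =>
    -- disk is [] at every iteration head (it is emptied at the end of each pass), so the
    -- `len(disk) == 0` test is always true and the `else: second += 1` branch is dead code.
    let wait_value := second - (PySem.List.pyGet? value.2 0).getD 0
    let work_value := (PySem.List.pyGet? value.2 1).getD 0
    popLoop (heap.erase value) (answer + (wait_value + work_value)) (second + work_value)
termination_by heap.length
decreasing_by
  have hmem := PySem.List.min?_mem hm
  rw [List.length_erase_of_mem hmem]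
  have := List.length_pos_of_mem hmem
  omega

def solution (jobs : List (List Int)) : Int :=
  let tmp_heap := jobs.foldl (fun h i => h ++ [((PySem.List.pyGet? i 1).getD 0, i)]) []
  PySem.Int.floordiv (popLoop tmp_heap 0 0) jobs.length

-- ===== PORT B =====
def solution_alt (jobs : List (List Int)) : Int :=
  let n : Int := jobs.length
  let total := -(jobs.foldl (fun acc j => acc + (PySem.List.pyGet? j 0).getD 0) 0)
  let r := (PySem.List.sorted (jobs.map fun j => (PySem.List.pyGet? j 1).getD 0) (fun d => d)).foldl
    (fun (p : Int × Int) d => (p.1 + d * p.2, p.2 - 1)) (total, n)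
  PySem.Int.floordiv r.1 n

-- ===== PRECONDITION & SPEC =====
-- Pre_ excludes exactly the inputs on which the Python A raises: the empty list
-- (ZeroDivisionError on `answer // len(jobs)`) and jobs with fewer than two entries
-- (IndexError on i[1] / value[1][0]).
def Pre_solution (jobs : List (List Int)) : Prop :=
  jobs ≠ [] ∧ ∀ j ∈ jobs, 2 ≤ j.length
instance (jobs : List (List Int)) : Decidable (Pre_solution jobs) := by unfold Pre_solution; infer_instance
def pvWitness_solution : List (List Int) := [[0, 3], [1, 9], [2, 6]]

def Spec_solution (jobs : List (List Int)) (out : Int) : Prop := out = solution_alt jobs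
instance (jobs : List (List Int)) (out : Int) : Decidable (Spec_solution jobs out) := by unfold Spec_solution; infer_instance

-- ===== CLAIM (what is proved, stated in full; the proofs are below) =====
def Claim_equal_solution : Prop := ∀ (jobs : List (List Int)), Dom_solution jobs → Pre_solution jobs → Spec_solution jobs (solution jobs)

-- ===== LEMMAS AND PROOFS =====

def durOf (j : List Int) : Int := (PySem.List.pyGet? j 1).getD 0
def startOf (j : List Int) : Int := (PySem.List.pyGet? j 0).getD 0

-- weighted sum: head of a k-element list is counted k times
def wsum : List Int → Int
  | [] => 0
  | d :: t => d * (t.length + 1) + wsum t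

-- the fold step of A's pop loop, on heap entries
def stepE (p : Int × Int) (v : Int × List Int) : Int × Int :=
  (p.1 + ((p.2 - startOf v.2) + durOf v.2), p.2 + durOf v.2)

theorem pyLex_injective : Function.Injective pyLex := fun a b h => by
  simpa [pyLex] using h

-- sorted(h) = min(h) :: sorted(h.erase min(h))  — selection step of the sort
theorem sorted_cons_min (h : List (Int × List Int)) (m : Int × List Int)
    (hm : PySem.List.min? h pyLex = some m) :
    PySem.List.sorted h pyLex = m :: PySem.List.sorted (h.erase m) pyLex := by
  apply List.Perm.eq_of_pairwise
  · intro a b _ _ h1 h2; exact pyLex_injective (le_antisymm h1 h2)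
  · exact PySem.List.sorted_pairwise h pyLex
  · constructor
    · intro y hy
      exact PySem.List.min?_isMin hm y
        (List.mem_of_mem_erase ((PySem.List.mem_sorted _ _ _ _).mp hy))
    · exact PySem.List.sorted_pairwise (h.erase m) pyLex
  · exact ((PySem.List.sorted_perm h pyLex false).trans
      (List.perm_cons_erase (PySem.List.min?_mem hm))).trans
      (List.Perm.cons m (PySem.List.sorted_perm (h.erase m) pyLex false).symm)

-- A's pop-the-minimum loop is the fold of stepE over the sorted heap
theorem popLoop_eq_foldl (h : List (Int × List Int)) (a s : Int) :
    popLoop h a s = ((PySem.List.sorted h pyLex).foldl stepE (a, s)).1 := by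
  induction hn : h.length using Nat.strong_induction_on generalizing h a s with
  | _ n ih =>
    match hm : PySem.List.min? h pyLex with
    | none =>
      have : h = [] := (PySem.List.min?_eq_none_iff _ _).mp hm
      subst this
      rw [popLoop]
      rfl
    | some m =>
      rw [sorted_cons_min h m hm, List.foldl_cons, popLoop]
      have hmem := PySem.List.min?_mem hm
      have hlt : (h.erase m).length < n := by
        rw [List.length_erase_of_mem hmem]
        have := List.length_pos_of_mem hmem
        omega
      split
      · next heq => rw [hm] at heq; cases heq
      · next value heq =>
        have hv : value = m := by rw [hm] at heq; exact (Option.some.inj heq).symm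
        subst hv
        rw [ih _ hlt _ _ _ rfl]
        rfl

-- the heap built by the heappush loop is a map over jobs
theorem heap_eq_map (jobs : List (List Int)) :
    jobs.foldl (fun h i => h ++ [((PySem.List.pyGet? i 1).getD 0, i)]) []
      = jobs.map (fun i => (durOf i, i)) := by
  simpa using PySem.List.foldl_append_singleton_eq_map (fun i => (durOf i, i)) jobs []

-- the clock-simulation fold in closed form: weighted duration sum minus start sum
theorem foldl_stepE_closed (js : List (List Int)) (a t : Int) :
    ((js.map (fun i => (durOf i, i))).foldl stepE (a, t)).1
      = a + t * js.length + wsum (js.map durOf) - (js.map startOf).sum := by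
  induction js generalizing a t with
  | nil => simp [wsum]
  | cons j tl ih =>
    simp only [List.map_cons, List.foldl_cons, stepE, wsum, List.sum_cons, List.length_cons,
      List.length_map, ih]
    push_cast
    ring

-- B's remaining-count fold in closed form
theorem foldl_B_closed (D : List Int) (a r : Int) :
    (D.foldl (fun (p : Int × Int) d => (p.1 + d * p.2, p.2 - 1)) (a, r)).1
      = a + wsum D + (r - D.length) * D.sum := by
  induction D generalizing a r with
  | nil => simp [wsum]
  | cons d t ih =>
    simp only [List.foldl_cons, ih, wsum, List.sum_cons, List.length_cons]
    push_cast
    ring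

-- the durations of the lexicographically sorted jobs are the sorted durations
theorem durs_sorted (jobs : List (List Int)) :
    (PySem.List.sorted jobs (fun j => pyLex (durOf j, j))).map durOf
      = PySem.List.sorted (jobs.map durOf) (fun d => d) := by
  refine (PySem.List.sorted_id_eq_of_perm_of_pairwise _ _
    ((PySem.List.sorted_perm jobs _ false).map durOf) ?_).symm
  rw [List.pairwise_map]
  refine (PySem.List.sorted_pairwise jobs (fun j => pyLex (durOf j, j))).imp ?_
  intro a b hab
  rcases Prod.Lex.le_iff.mp hab with hlt | ⟨heq, _⟩
  · exact le_of_lt hlt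
  · exact le_of_eq heq

-- sorting heap entries = mapping the sorted job order into entries
theorem sorted_map_entries (jobs : List (List Int)) :
    PySem.List.sorted (jobs.map (fun i => (durOf i, i))) pyLex
      = (PySem.List.sorted jobs (fun j => pyLex (durOf j, j))).map (fun i => (durOf i, i)) := by
  apply List.Perm.eq_of_pairwise
  · intro a b _ _ h1 h2; exact pyLex_injective (le_antisymm h1 h2)
  · exact PySem.List.sorted_pairwise _ pyLex
  · rw [List.pairwise_map]
    exact PySem.List.sorted_pairwise jobs (fun j => pyLex (durOf j, j))
  · exact (PySem.List.sorted_perm _ pyLex false).trans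
      ((PySem.List.sorted_perm jobs _ false).symm.map _)

-- ===== VERDICT (by name: the statement is the Claim_ definition above) =====
theorem solution_spec : Claim_equal_solution := by
  intro jobs _ _
  show solution jobs = solution_alt jobs
  have hperm : (PySem.List.sorted jobs (fun j => pyLex (durOf j, j))).Perm jobs :=
    PySem.List.sorted_perm jobs _ false
  simp only [solution, solution_alt, heap_eq_map, popLoop_eq_foldl, sorted_map_entries]
  rw [foldl_stepE_closed, foldl_B_closed, durs_sorted, PySem.List.foldl_add]
  have h1 : ((PySem.List.sorted jobs (fun j => pyLex (durOf j, j))).map startOf).sum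
      = (jobs.map startOf).sum := (hperm.map startOf).sum_eq
  have h3 : (PySem.List.sorted (jobs.map durOf) (fun d => d)).length = jobs.length := by
    rw [PySem.List.length_sorted, List.length_map]
  simp only [show (fun j => (PySem.List.pyGet? j 1).getD 0) = durOf from rfl,
    show (fun j => (PySem.List.pyGet? j 0).getD 0) = startOf from rfl, h3]
  rw [h1]
  congr 1
  ring
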